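-- pv_equiv track=rewrite | github.com/hejinsome/CMDFNet | R8_Scan.py | diagonal_scan
-- ===== SOURCE A (Python) =====
-- def diagonal_scan(H, W, direction="lr"):
--     '''
--     direction:
--     'lr'(↘ top-left → bottom-right),
--     'rl'(↙ top-right → bottom-left)
--     '''
--     seq = []
--     if direction in ["lr"]:
--         for diagon in range(H + W - 1):
--             row = 0 if diagon < W else diagon - W + 1
--             col = diagon if diagon < W else W - 1
--             while row < H and col >= 0:
--                 idx = row * W + col
--                 seq.append(idx)
--                 row += 1
--                 col -= 1
--     elif direction in ["rl"]:
--         for diagon in range(H + W - 1):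
--             row = 0 if diagon < W else diagon - W + 1
--             col = W - 1 - diagon if diagon < W else 0
--             while row < H and col < W:
--                 idx = row * W + col
--                 seq.append(idx)
--                 row += 1
--                 col += 1
--     return seq
-- ===== SOURCE B (Python) =====
-- def diagonal_scan(H, W, direction="lr"):
--     # One row-major pass bucketing each cell by its diagonal key, then
--     # concatenate the buckets in ascending key order.
--     if direction == "lr":
--         key = lambda r, c: r + c
--     elif direction == "rl":
--         key = lambda r, c: r - c + W - 1
--     else:
--         return []
--     buckets = {}
--     for r in range(H):
--         for c in range(W):
--             buckets.setdefault(key(r, c), []).append(r * W + c)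
--     out = []
--     for d in range(H + W - 1):
--         out += buckets.get(d, [])
--     return out
-- ===== Notes on version B (the rewrite author's own statement) =====
-- stated objective: alternative
-- what changed: Replaces A's per-diagonal walk (conditional start cell plus a while-loop marching down each diagonal) by a single row-major pass that buckets every cell index under its diagonal key in a dict and then concatenates the buckets in ascending key order.
import Mathlib
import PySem

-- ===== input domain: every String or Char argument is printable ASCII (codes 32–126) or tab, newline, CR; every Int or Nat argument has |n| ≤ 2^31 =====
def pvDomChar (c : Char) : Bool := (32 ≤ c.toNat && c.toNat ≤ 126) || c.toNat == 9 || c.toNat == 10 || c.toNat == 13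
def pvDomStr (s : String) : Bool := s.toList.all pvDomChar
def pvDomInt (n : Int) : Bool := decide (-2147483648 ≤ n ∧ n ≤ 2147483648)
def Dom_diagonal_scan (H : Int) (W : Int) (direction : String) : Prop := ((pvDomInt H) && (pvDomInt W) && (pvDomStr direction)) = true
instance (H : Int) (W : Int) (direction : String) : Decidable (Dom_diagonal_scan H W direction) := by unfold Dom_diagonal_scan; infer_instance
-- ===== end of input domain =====

-- B replaces A's per-diagonal while-loop walk by one row-major pass that buckets
-- each cell index under its diagonal key in a dict, then concatenates the buckets
-- in ascending key order (objective: alternative decomposition, same cost).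

-- ===== PORT A =====
-- the inner 'while row < H and col >= 0' loop of the 'lr' branch
def lrWhile (H W : Int) (row col : Int) (seq : List Int) : List Int :=
  if _h : row < H ∧ 0 ≤ col then lrWhile H W (row + 1) (col - 1) (seq ++ [row * W + col]) else seq
termination_by (H - row).toNat
decreasing_by omega

-- the inner 'while row < H and col < W' loop of the 'rl' branch
def rlWhile (H W : Int) (row col : Int) (seq : List Int) : List Int :=
  if _h : row < H ∧ col < W then rlWhile H W (row + 1) (col + 1) (seq ++ [row * W + col]) else seq
termination_by (H - row).toNat
decreasing_by omega

def diagonal_scan (H : Int) (W : Int) (direction : String) : List Int :=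
  if direction = "lr" then
    (PySem.List.pyRange 0 (H + W - 1) 1).foldl (fun seq diagon =>
      lrWhile H W (if diagon < W then 0 else diagon - W + 1)
                  (if diagon < W then diagon else W - 1) seq) []
  else if direction = "rl" then
    (PySem.List.pyRange 0 (H + W - 1) 1).foldl (fun seq diagon =>
      rlWhile H W (if diagon < W then 0 else diagon - W + 1)
                  (if diagon < W then W - 1 - diagon else 0) seq) []
  else []

-- ===== PORT B =====
-- 'for r in range(H): for c in range(W): buckets.setdefault(key(r,c), []).append(r*W+c)'
def altBuckets (H W : Int) (key : Int → Int → Int) : PySem.Dict Int (List Int) :=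
  (PySem.List.pyRange 0 H 1).foldl (fun bs r =>
    (PySem.List.pyRange 0 W 1).foldl (fun bs c =>
      PySem.Dict.modify bs (key r c) [] (· ++ [r * W + c])) bs) PySem.Dict.empty

-- 'out = []; for d in range(H+W-1): out += buckets.get(d, [])'
def altCore (H W : Int) (key : Int → Int → Int) : List Int :=
  (PySem.List.pyRange 0 (H + W - 1) 1).foldl
    (fun out d => out ++ PySem.Dict.getD (altBuckets H W key) d []) []

def diagonal_scan_alt (H : Int) (W : Int) (direction : String) : List Int :=
  if direction = "lr" then altCore H W (fun r c => r + c)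
  else if direction = "rl" then altCore H W (fun r c => r - c + W - 1)
  else []

-- ===== PRECONDITION & SPEC =====
def Spec_diagonal_scan (H : Int) (W : Int) (direction : String) (out : List Int) : Prop := out = diagonal_scan_alt H W direction
instance (H : Int) (W : Int) (direction : String) (out : List Int) : Decidable (Spec_diagonal_scan H W direction out) := by unfold Spec_diagonal_scan; infer_instance

-- ===== CLAIM (what is proved, stated in full; the proofs are below) =====
def Claim_equal_diagonal_scan : Prop := ∀ (H : Int) (W : Int) (direction : String), Dom_diagonal_scan H W direction → Spec_diagonal_scan H W direction (diagonal_scan H W direction)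

-- ===== LEMMAS AND PROOFS =====

-- filtering a range by equality yields at most a singleton
theorem filter_eq_pyRange (a b t : Int) :
    (PySem.List.pyRange a b 1).filter (fun x => x == t) = if a ≤ t ∧ t < b then [t] else [] := by
  generalize hn : (b - a).toNat = n
  induction n generalizing a with
  | zero =>
    rw [PySem.List.pyRange_one_eq_nil (a := a) (b := b) (by omega)]
    simp only [List.filter_nil]
    rw [if_neg (by omega)]
  | succ n ih =>
    rw [PySem.List.pyRange_one_cons (a := a) (b := b) (by omega)]
    rw [List.filter_cons]
    rcases eq_or_ne a t with h | h
    · subst h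
      simp only [BEq.rfl, if_pos trivial]
      rw [ih (a + 1) (by omega)]
      rw [if_neg (by omega), if_pos ⟨le_refl a, by omega⟩]
    · rw [if_neg (by simp [h]), ih (a + 1) (by omega)]
      by_cases hm : a + 1 ≤ t ∧ t < b
      · rw [if_pos hm, if_pos (by omega)]
      · rw [if_neg hm, if_neg (by omega)]

-- filtering a range by an interval condition yields a sub-range
theorem filter_interval_pyRange (a b lo hi : Int) :
    (PySem.List.pyRange a b 1).filter (fun x => decide (lo ≤ x ∧ x < hi)) =
      PySem.List.pyRange (max a lo) (min b hi) 1 := by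
  generalize hn : (b - a).toNat = n
  induction n generalizing a with
  | zero =>
    rw [PySem.List.pyRange_one_eq_nil (a := a) (b := b) (by omega),
      PySem.List.pyRange_one_eq_nil (a := max a lo) (b := min b hi) (by omega)]
    simp
  | succ n ih =>
    rw [PySem.List.pyRange_one_cons (a := a) (b := b) (by omega)]
    rw [List.filter_cons]
    by_cases ha : lo ≤ a ∧ a < hi
    · rw [if_pos (by simpa using ha), ih (a + 1) (by omega)]
      have h1 : max a lo = a := by omega
      have h2 : max (a + 1) lo = a + 1 := by omega
      rw [h1, h2, PySem.List.pyRange_one_cons (a := a) (b := min b hi) (by omega)]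
    · rw [if_neg (by simpa using ha), ih (a + 1) (by omega)]
      by_cases hb : b ≤ a + 1
      · rw [PySem.List.pyRange_one_eq_nil (a := max (a + 1) lo) (b := min b hi) (by omega),
          PySem.List.pyRange_one_eq_nil (a := max a lo) (b := min b hi) (by omega)]
      · have hm : max (a + 1) lo = max a lo ∨ min b hi ≤ max a lo := by omega
        rcases hm with h | h
        · rw [h]
        · rw [PySem.List.pyRange_one_eq_nil (a := max (a + 1) lo) (b := min b hi) (by omega),
            PySem.List.pyRange_one_eq_nil (a := max a lo) (b := min b hi) (by omega)]

-- a flatMap of conditional singletons is a filtered map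
theorem flatMap_ite_singleton (l : List Int) (p : Int → Prop) [DecidablePred p] (g : Int → Int) :
    l.flatMap (fun x => if p x then [g x] else []) = (l.filter (fun x => decide (p x))).map g := by
  induction l with
  | nil => rfl
  | cons x xs ih =>
    rw [List.flatMap_cons, List.filter_cons]
    by_cases h : p x
    · simp [h, ih]
    · simp [h, ih]

-- the lr while-loop emits the cells (r, s - r) for r from row while r < H and s - r ≥ 0
theorem lrWhile_eq (H W : Int) : ∀ (n : Nat) (row col s : Int) (seq : List Int),
    (H - row).toNat = n → s = row + col →
    lrWhile H W row col seq =
      seq ++ (PySem.List.pyRange row (min H (s + 1)) 1).map (fun r => r * W + (s - r)) := by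
  intro n
  induction n with
  | zero =>
    intro row col s seq hn hs
    rw [lrWhile, dif_neg (by omega),
      PySem.List.pyRange_one_eq_nil (a := row) (b := min H (s + 1)) (by omega)]
    simp
  | succ n ih =>
    intro row col s seq hn hs
    rw [lrWhile]
    by_cases h : row < H ∧ 0 ≤ col
    · rw [dif_pos h, ih (row + 1) (col - 1) s _ (by omega) (by omega)]
      rw [PySem.List.pyRange_one_cons (a := row) (b := min H (s + 1)) (by omega), List.map_cons]
      have he : row * W + (s - row) = row * W + col := by omega
      rw [he, List.append_assoc, List.singleton_append]
    · rw [dif_neg h, PySem.List.pyRange_one_eq_nil (a := row) (b := min H (s + 1)) (by omega)]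
      simp

-- the rl while-loop emits the cells (r, r + t) for r from row while r < H and r + t < W
theorem rlWhile_eq (H W : Int) : ∀ (n : Nat) (row col t : Int) (seq : List Int),
    (H - row).toNat = n → t = col - row →
    rlWhile H W row col seq =
      seq ++ (PySem.List.pyRange row (min H (W - t)) 1).map (fun r => r * W + (r + t)) := by
  intro n
  induction n with
  | zero =>
    intro row col t seq hn ht
    rw [rlWhile, dif_neg (by omega),
      PySem.List.pyRange_one_eq_nil (a := row) (b := min H (W - t)) (by omega)]
    simp
  | succ n ih =>
    intro row col t seq hn ht
    rw [rlWhile]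
    by_cases h : row < H ∧ col < W
    · rw [dif_pos h, ih (row + 1) (col + 1) t _ (by omega) (by omega)]
      rw [PySem.List.pyRange_one_cons (a := row) (b := min H (W - t)) (by omega), List.map_cons]
      have he : row * W + (row + t) = row * W + col := by omega
      rw [he, List.append_assoc, List.singleton_append]
    · rw [dif_neg h, PySem.List.pyRange_one_eq_nil (a := row) (b := min H (W - t)) (by omega)]
      simp

-- B's buckets, read back at key d, hold precisely the row-major cells of diagonal d
theorem altBuckets_getD (H W : Int) (key : Int → Int → Int) (d : Int) :
    PySem.Dict.getD (altBuckets H W key) d [] =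
      (PySem.List.pyRange 0 H 1).flatMap (fun r =>
        ((PySem.List.pyRange 0 W 1).filter (fun c => key r c == d)).map (fun c => r * W + c)) := by
  unfold altBuckets
  have hmap : (fun (bs : PySem.Dict Int (List Int)) (r : Int) => (PySem.List.pyRange 0 W 1).foldl
      (fun bs c => PySem.Dict.modify bs (key r c) [] (· ++ [r * W + c])) bs) =
      (fun bs r => ((PySem.List.pyRange 0 W 1).map (fun c => (key r c, r * W + c))).foldl
        (fun bs p => PySem.Dict.modify bs p.1 [] (· ++ [p.2])) bs) := by
    funext bs r
    rw [List.foldl_map]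
  rw [hmap, ← List.foldl_flatMap, PySem.Dict.getD_foldl_modify_append]
  rw [List.filter_flatMap]
  simp only [List.filter_map, PySem.Dict.getD_empty, List.nil_append, List.map_flatMap,
    List.map_map]
  rfl

-- one diagonal of B, as a mapped sub-range of rows
theorem bucket_eq (H W d t0 : Int) (key : Int → Int → Int) (tf g : Int → Int)
    (hk : ∀ r c, (key r c == d) = (c == tf r))
    (ht : ∀ r, (0 ≤ tf r ∧ tf r < W) ↔ (t0 ≤ r ∧ r < d + 1))
    (hg : ∀ r, r * W + tf r = g r) :
    PySem.Dict.getD (altBuckets H W key) d [] =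
      (PySem.List.pyRange (max 0 t0) (min H (d + 1)) 1).map g := by
  rw [altBuckets_getD]
  have hr : ∀ r, ((PySem.List.pyRange 0 W 1).filter (fun c => key r c == d)).map
      (fun c => r * W + c) = if t0 ≤ r ∧ r < d + 1 then [g r] else [] := by
    intro r
    rw [List.filter_congr (fun c _ => hk r c), filter_eq_pyRange 0 W (tf r),
      apply_ite (List.map (fun c => r * W + c))]
    rcases ht r with ⟨h1, h2⟩
    by_cases hc : t0 ≤ r ∧ r < d + 1
    · rw [if_pos (h2 hc), if_pos hc, List.map_cons, List.map_nil, hg]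
    · rw [if_neg (fun h => hc (h1 h)), if_neg hc, List.map_nil]
  rw [List.flatMap_congr (fun r _ => hr r), flatMap_ite_singleton,
    filter_interval_pyRange 0 H t0 (d + 1)]

-- ===== VERDICT (by name: the statement is the Claim_ definition above) =====
theorem diagonal_scan_spec : Claim_equal_diagonal_scan := by
  intro H W direction _
  unfold Spec_diagonal_scan diagonal_scan diagonal_scan_alt
  by_cases hlr : direction = "lr"
  · rw [if_pos hlr, if_pos hlr]
    unfold altCore
    have hA : (fun (seq : List Int) diagon => lrWhile H W
        (if diagon < W then 0 else diagon - W + 1)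
        (if diagon < W then diagon else W - 1) seq) =
        (fun seq d => seq ++ (PySem.List.pyRange (if d < W then 0 else d - W + 1)
          (min H (d + 1)) 1).map (fun r => r * W + (d - r))) := by
      funext seq d
      by_cases hd : d < W
      · simp only [if_pos hd]
        rw [lrWhile_eq H W (H - 0).toNat 0 d d seq rfl (by omega)]
      · simp only [if_neg hd]
        rw [lrWhile_eq H W (H - (d - W + 1)).toNat (d - W + 1) (W - 1) d seq rfl (by omega)]
    rw [hA, PySem.List.foldl_append_eq_flatMap, PySem.List.foldl_append_eq_flatMap,
      List.nil_append, List.nil_append]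
    apply List.flatMap_congr
    intro d hd
    have hd0 : 0 ≤ d := (PySem.List.mem_pyRange_one.mp hd).1
    rw [bucket_eq H W d (d - W + 1) _ (fun r => d - r) (fun r => r * W + (d - r))
      (fun r c => by beta_reduce; apply Bool.eq_iff_iff.mpr; simp only [beq_iff_eq]; omega)
      (fun r => by beta_reduce; omega) (fun r => rfl)]
    have : (if d < W then (0 : Int) else d - W + 1) = max 0 (d - W + 1) := by
      split <;> omega
    rw [this]
  · rw [if_neg hlr, if_neg hlr]
    by_cases hrl : direction = "rl"
    · rw [if_pos hrl, if_pos hrl]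
      unfold altCore
      have hA : (fun (seq : List Int) diagon => rlWhile H W
          (if diagon < W then 0 else diagon - W + 1)
          (if diagon < W then W - 1 - diagon else 0) seq) =
          (fun seq d => seq ++ (PySem.List.pyRange (if d < W then 0 else d - W + 1)
            (min H (d + 1)) 1).map (fun r => r * W + (r + W - 1 - d))) := by
        funext seq d
        by_cases hd : d < W
        · simp only [if_pos hd]
          rw [rlWhile_eq H W (H - 0).toNat 0 (W - 1 - d) (W - 1 - d) seq rfl (by omega)]
          have h1 : W - (W - 1 - d) = d + 1 := by ring
          rw [h1]
          exact congrArg _ (List.map_congr_left (fun r _ => by ring))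
        · simp only [if_neg hd]
          rw [rlWhile_eq H W (H - (d - W + 1)).toNat (d - W + 1) 0 (W - 1 - d) seq
              rfl (by omega)]
          have h1 : W - (W - 1 - d) = d + 1 := by ring
          rw [h1]
          exact congrArg _ (List.map_congr_left (fun r _ => by ring))
      rw [hA, PySem.List.foldl_append_eq_flatMap, PySem.List.foldl_append_eq_flatMap,
        List.nil_append, List.nil_append]
      apply List.flatMap_congr
      intro d hd
      have hd0 : 0 ≤ d := (PySem.List.mem_pyRange_one.mp hd).1
      rw [bucket_eq H W d (d - W + 1) _ (fun r => r + W - 1 - d)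
        (fun r => r * W + (r + W - 1 - d))
        (fun r c => by beta_reduce; apply Bool.eq_iff_iff.mpr; simp only [beq_iff_eq]; omega)
        (fun r => by beta_reduce; omega) (fun r => rfl)]
      have : (if d < W then (0 : Int) else d - W + 1) = max 0 (d - W + 1) := by
        split <;> omega
      rw [this]
    · rw [if_neg hrl, if_neg hrl]
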